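-- pv_equiv track=rewrite | github.com/altmunch/clipscommerce-1 | backend/app/services/ai/brand_assimilation.py | _select_important_links
-- ===== SOURCE A (Python) =====
-- from typing import Any, Dict, List, Optional, Set, Tuple
--
-- def _select_important_links(links: List[str]) -> List[str]:
--     """Select most important links to scrape"""
--     important_keywords = [
--         "about", "mission", "story", "values", "team",
--         "products", "services", "solutions",
--         "contact", "careers", "press"
--     ]
--
--     scored_links = []
--     for link in links:
--         score = 0
--         link_lower = link.lower()
--
--         for keyword in important_keywords:
--             if keyword in link_lower:
--                 score += 1
--
--         scored_links.append((score, link))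
--
--     # Sort by score and return top links
--     scored_links.sort(key=lambda x: x[0], reverse=True)
--     return [link for score, link in scored_links if score > 0]
-- ===== SOURCE B (Python) =====
-- def _select_important_links(links):
--     """Select most important links to scrape (bucket selection, no sort)."""
--     important_keywords = [
--         "about", "mission", "story", "values", "team",
--         "products", "services", "solutions",
--         "contact", "careers", "press"
--     ]
--     scored = [(sum(k in link.lower() for k in important_keywords), link)
--               for link in links]
--     # Scores lie in 0..11: emit score groups from high to low, skipping score 0.
--     return [link for s in range(11, 0, -1) for sc, link in scored if sc == s]
-- ===== Notes on version B (the rewrite author's own statement) =====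
-- stated objective: alternative
-- what changed: B replaces the stable comparison sort + positive-score filter by a counting/bucket selection: it scores each link once, then emits the score groups for s = 11 down to 1 in original order, which yields the reverse-sorted, score>0 list directly.
import Mathlib
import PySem

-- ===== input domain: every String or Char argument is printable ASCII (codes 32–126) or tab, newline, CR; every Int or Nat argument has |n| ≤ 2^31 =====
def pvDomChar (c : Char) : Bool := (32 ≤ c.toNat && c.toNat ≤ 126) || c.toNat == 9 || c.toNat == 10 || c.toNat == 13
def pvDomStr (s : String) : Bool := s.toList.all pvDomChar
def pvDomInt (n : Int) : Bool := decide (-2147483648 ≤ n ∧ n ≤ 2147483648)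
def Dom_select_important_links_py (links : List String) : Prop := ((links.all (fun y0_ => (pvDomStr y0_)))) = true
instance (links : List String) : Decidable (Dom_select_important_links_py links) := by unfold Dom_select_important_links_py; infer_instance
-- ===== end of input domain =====

-- B replaces A's stable sort + filter by a bucket selection over the fixed score range 11..1 (objective: alternative).

def pvKeywords : List String :=
  ["about", "mission", "story", "values", "team",
   "products", "services", "solutions",
   "contact", "careers", "press"]

-- ===== PORT A =====
def select_important_links_py (links : List String) : List String :=
  let scored_links := links.foldl (fun acc link =>
    let link_lower := PySem.Str.lower link
    let score := pvKeywords.foldl (fun score keyword =>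
      if PySem.Str.isIn keyword link_lower then score + 1 else score) (0 : Int)
    acc ++ [(score, link)]) []
  let sorted_links := PySem.List.sorted scored_links (fun x => x.1) true
  (sorted_links.filter (fun p => decide (0 < p.1))).map (fun p => p.2)

-- ===== PORT B =====
def select_important_links_py_alt (links : List String) : List String :=
  let scored := links.map (fun link =>
    ((pvKeywords.map (fun k => if PySem.Str.isIn k (PySem.Str.lower link) then (1 : Int) else 0)).sum, link))
  (PySem.List.pyRange 11 0 (-1)).flatMap (fun s =>
    (scored.filter (fun p => p.1 == s)).map (fun p => p.2))

-- ===== PRECONDITION & SPEC =====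
def Spec_select_important_links_py (links : List String) (out : List String) : Prop := out = select_important_links_py_alt links
instance (links : List String) (out : List String) : Decidable (Spec_select_important_links_py links out) := by unfold Spec_select_important_links_py; infer_instance

-- ===== CLAIM (what is proved, stated in full; the proofs are below) =====
def Claim_equal_select_important_links_py : Prop := ∀ (links : List String), Dom_select_important_links_py links → Spec_select_important_links_py links (select_important_links_py links)

-- ===== LEMMAS AND PROOFS =====

-- the score of a link, as a countP
def pvScore (link : String) : Int :=
  (pvKeywords.countP (fun k => PySem.Str.isIn k (PySem.Str.lower link)) : Int)

theorem pvScore_nonneg (link : String) : 0 ≤ pvScore link := by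
  unfold pvScore; exact Int.natCast_nonneg _

theorem pvScore_le (link : String) : pvScore link ≤ 11 := by
  unfold pvScore
  have h : List.countP (fun k => PySem.Str.isIn k (PySem.Str.lower link)) pvKeywords
      ≤ pvKeywords.length := List.countP_le_length
  have hl : pvKeywords.length = 11 := rfl
  omega

theorem insertBy_append_not {α : Type} (before : α → α → Bool) (x : α) (l t : List α)
    (h : ∀ y ∈ l, before x y = false) :
    PySem.List.insertBy before x (l ++ t) = l ++ PySem.List.insertBy before x t := by
  induction l with
  | nil => simp
  | cons y ys ih =>
    have hy : before x y = false := h y (by simp)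
    simp [PySem.List.insertBy, hy, ih (fun z hz => h z (by simp [hz]))]

theorem insertBy_bucket {α : Type} (key : α → Int) (x : α) (xs : List α) :
    ∀ (ks : List Int), ks.Pairwise (· > ·) → key x ∈ ks →
    PySem.List.insertBy (fun a b => decide (key b < key a)) x
        (ks.flatMap (fun s => xs.filter (fun y => key y == s)))
      = ks.flatMap (fun s => (xs ++ [x]).filter (fun y => key y == s)) := by
  intro ks
  induction ks with
  | nil => intro _ h; simp at h
  | cons s ks ih =>
    intro hpw hmem
    have hpw' : ks.Pairwise (· > ·) := hpw.of_cons
    have hlt : ∀ s' ∈ ks, s' < s := fun s' hs' => (List.pairwise_cons.mp hpw).1 s' hs'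
    by_cases hx : key x = s
    · -- x lands at the end of the s-bucket
      have h1 : ∀ y ∈ xs.filter (fun y => key y == s), (fun a b => decide (key b < key a)) x y = false := by
        intro y hy
        have : key y = s := by simpa using (List.of_mem_filter hy)
        simp [this, hx]
      have h2 : PySem.List.insertBy (fun a b => decide (key b < key a)) x
          (ks.flatMap (fun s => xs.filter (fun y => key y == s)))
          = x :: ks.flatMap (fun s => xs.filter (fun y => key y == s)) := by
        cases hrest : ks.flatMap (fun s => xs.filter (fun y => key y == s)) with
        | nil => simp [PySem.List.insertBy]
        | cons z zs =>
          have hz : z ∈ ks.flatMap (fun s => xs.filter (fun y => key y == s)) := by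
            rw [hrest]; simp
          obtain ⟨s', hs', hzf⟩ := List.mem_flatMap.mp hz
          have hkz : key z = s' := by simpa using (List.of_mem_filter hzf)
          have : key z < key x := by
            rw [hkz, hx]; exact hlt s' hs'
          simp [PySem.List.insertBy, this]
      have h3 : ∀ s' ∈ ks, ((xs ++ [x]).filter (fun y => key y == s'))
          = xs.filter (fun y => key y == s') := by
        intro s' hs'
        have : key x ≠ s' := by have := hlt s' hs'; omega
        simp [List.filter_append, this]
      rw [List.flatMap_cons, List.flatMap_cons,
        insertBy_append_not _ _ _ _ h1, h2]
      have h4 : (xs ++ [x]).filter (fun y => key y == s) = xs.filter (fun y => key y == s) ++ [x] := by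
        simp [List.filter_append, hx]
      rw [h4]
      simp only [List.append_assoc, List.cons_append, List.nil_append]
      congr 1
      congr 1
      exact (List.flatMap_congr (fun s' hs' => (h3 s' hs').symm))
    · -- x belongs to a later bucket
      have hmem' : key x ∈ ks := by
        rcases List.mem_cons.mp hmem with h | h
        · exact absurd h hx
        · exact h
      have h1 : ∀ y ∈ xs.filter (fun y => key y == s), (fun a b => decide (key b < key a)) x y = false := by
        intro y hy
        have hy' : key y = s := by simpa using (List.of_mem_filter hy)
        have : key x < s := by have := hlt _ hmem'; omega
        simp [hy']; omega
      have h4 : (xs ++ [x]).filter (fun y => key y == s) = xs.filter (fun y => key y == s) := by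
        simp [List.filter_append, hx]
      rw [List.flatMap_cons, List.flatMap_cons, insertBy_append_not _ _ _ _ h1,
        ih hpw' hmem', h4]

-- stable reverse sort by an Int key with values in a strictly descending key list = bucket concatenation
theorem sorted_rev_eq_flatMap {α : Type} (key : α → Int) (ks : List Int)
    (hks : ks.Pairwise (· > ·)) :
    ∀ xs : List α, (∀ y ∈ xs, key y ∈ ks) →
    PySem.List.sorted xs key true = ks.flatMap (fun s => xs.filter (fun y => key y == s)) := by
  intro xs
  rw [PySem.List.sorted_rev_eq_foldl_insertBy]
  induction xs using List.reverseRecOn with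
  | nil => intro _; simp
  | append_singleton xs x ih =>
    intro h
    rw [List.foldl_append, List.foldl_cons, List.foldl_nil,
      ih (fun y hy => h y (by simp [hy]))]
    exact insertBy_bucket key x xs ks hks (h x (by simp))

theorem select_important_links_py_spec_aux (links : List String) :
    select_important_links_py links = select_important_links_py_alt links := by
  unfold select_important_links_py select_important_links_py_alt
  -- both scored lists are links.map (fun l => (pvScore l, l))
  have hscoreA : ∀ link : String,
      pvKeywords.foldl (fun score keyword =>
        if PySem.Str.isIn keyword (PySem.Str.lower link) then score + 1 else score) (0 : Int)
      = pvScore link := by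
    intro link
    rw [PySem.List.foldl_if_add_one]
    unfold pvScore; ring
  have hscoreB : ∀ link : String,
      (pvKeywords.map (fun k => if PySem.Str.isIn k (PySem.Str.lower link) then (1 : Int) else 0)).sum
      = pvScore link := by
    intro link
    rw [PySem.List.sum_map_ite_one_zero]
    unfold pvScore; rfl
  simp only [PySem.List.foldl_append_singleton_eq_map, List.nil_append, hscoreA, hscoreB]
  set scored := links.map (fun link => (pvScore link, link)) with hscored
  -- name the descending key list covering all scores
  have hsorted : PySem.List.sorted scored (fun x => x.1) true
      = ([11, 10, 9, 8, 7, 6, 5, 4, 3, 2, 1, 0] : List Int).flatMap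
          (fun s => scored.filter (fun y => y.1 == s)) := by
    refine sorted_rev_eq_flatMap (α := Int × String) (fun x => x.1)
      ([11, 10, 9, 8, 7, 6, 5, 4, 3, 2, 1, 0] : List Int) (by decide) scored ?_
    intro y hy
    obtain ⟨l, _, rfl⟩ := List.mem_map.mp hy
    have h1 := pvScore_nonneg l
    have h2 := pvScore_le l
    simp only [List.mem_cons, List.not_mem_nil, or_false]
    omega
  rw [hsorted]
  have hrange : PySem.List.pyRange 11 0 (-1) = ([11, 10, 9, 8, 7, 6, 5, 4, 3, 2, 1] : List Int) := by decide
  rw [hrange]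
  have hsplit : ([11, 10, 9, 8, 7, 6, 5, 4, 3, 2, 1, 0] : List Int)
      = ([11, 10, 9, 8, 7, 6, 5, 4, 3, 2, 1] : List Int) ++ [0] := by decide
  rw [hsplit, List.flatMap_append, List.filter_append, List.map_append]
  have hzero : ((([0] : List Int).flatMap (fun s => scored.filter (fun y => y.1 == s))).filter
      (fun p => decide (0 < p.1))).map (fun p => p.2) = [] := by
    simp only [List.flatMap_cons, List.flatMap_nil, List.append_nil, List.map_eq_nil_iff,
      List.filter_eq_nil_iff]
    intro p hp
    have : p.1 = 0 := by simpa using (List.of_mem_filter hp)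
    simp [this]
  rw [hzero, List.append_nil]
  -- filter and map push inside the flatMap; each kept bucket passes the score>0 filter whole
  rw [List.filter_flatMap, List.map_flatMap]
  apply List.flatMap_congr
  intro s hs
  have hspos : (0 : Int) < s := by
    simp only [List.mem_cons, List.not_mem_nil, or_false] at hs
    omega
  have : (scored.filter (fun y => y.1 == s)).filter (fun p => decide (0 < p.1))
      = scored.filter (fun y => y.1 == s) := by
    apply List.filter_eq_self.mpr
    intro p hp
    have : p.1 = s := by simpa using (List.of_mem_filter hp)
    simp [this]; omega
  simp only [this]

-- ===== VERDICT (by name: the statement is the Claim_ definition above) =====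
theorem select_important_links_py_spec : Claim_equal_select_important_links_py := by
  intro links _
  exact select_important_links_py_spec_aux links
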